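-- pv_equiv track=rewrite | github.com/openvinotoolkit/nncf | nncf/common/tensor_statistics/reduction.py | get_channel_count_and_dim_idx
-- ===== SOURCE A (Python) =====
-- from typing import Callable, Deque, List, Tuple, Union
--
-- def get_channel_count_and_dim_idx(scale_shape: Tuple[int]) -> Tuple[int, int]:
--     channel_dim_idx = 0
--     channel_count = 1
--     for dim_idx, dim in enumerate(scale_shape):
--         if dim != 1:
--             channel_dim_idx = dim_idx
--             channel_count = dim
--     return channel_count, channel_dim_idx
-- ===== SOURCE B (Python) =====
-- def get_channel_count_and_dim_idx(scale_shape):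
--     for dim_idx, dim in reversed(list(enumerate(scale_shape))):
--         if dim != 1:
--             return dim, dim_idx
--     return 1, 0
-- ===== Notes on version B (the rewrite author's own statement) =====
-- stated objective: alternative
-- what changed: Replaces the forward full scan that keeps overwriting (count, idx) with a reverse early-terminating search that returns at the first non-unit dimension from the end.
import Mathlib
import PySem

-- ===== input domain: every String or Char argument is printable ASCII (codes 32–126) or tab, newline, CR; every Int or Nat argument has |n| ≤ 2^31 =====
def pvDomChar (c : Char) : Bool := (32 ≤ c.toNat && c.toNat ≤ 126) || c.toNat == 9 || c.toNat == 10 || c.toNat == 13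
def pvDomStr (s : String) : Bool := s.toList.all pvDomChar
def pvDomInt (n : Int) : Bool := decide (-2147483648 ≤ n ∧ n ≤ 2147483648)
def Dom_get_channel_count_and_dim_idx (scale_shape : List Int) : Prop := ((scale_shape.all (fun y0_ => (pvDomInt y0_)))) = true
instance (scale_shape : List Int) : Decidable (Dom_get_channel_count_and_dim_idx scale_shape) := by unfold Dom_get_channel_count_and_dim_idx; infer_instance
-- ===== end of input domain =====

-- B replaces A's forward overwrite scan by a reverse early-return search; objective: alternative (same cost).

-- ===== PORT A =====
-- forward loop over enumerate, state (channel_count, channel_dim_idx), overwritten at every non-unit dim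
def get_channel_count_and_dim_idx (scale_shape : List Int) : Int × Int :=
  (PySem.List.enumerate scale_shape).foldl
    (fun st p => if p.2 ≠ 1 then (p.2, p.1) else st) (1, 0)

-- ===== PORT B =====
-- reverse search: first non-unit dim from the end wins, else the (1, 0) fallback
def pvRevFind (l : List (Int × Int)) : Int × Int :=
  match l with
  | [] => (1, 0)
  | (i, d) :: rest => if d ≠ 1 then (d, i) else pvRevFind rest

def get_channel_count_and_dim_idx_alt (scale_shape : List Int) : Int × Int :=
  pvRevFind (PySem.List.enumerate scale_shape).reverse

-- ===== PRECONDITION & SPEC =====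
def Spec_get_channel_count_and_dim_idx (scale_shape : List Int) (out : Int × Int) : Prop := out = get_channel_count_and_dim_idx_alt scale_shape
instance (scale_shape : List Int) (out : Int × Int) : Decidable (Spec_get_channel_count_and_dim_idx scale_shape out) := by unfold Spec_get_channel_count_and_dim_idx; infer_instance

-- ===== CLAIM (what is proved, stated in full; the proofs are below) =====
def Claim_equal_get_channel_count_and_dim_idx : Prop := ∀ (scale_shape : List Int), Dom_get_channel_count_and_dim_idx scale_shape → Spec_get_channel_count_and_dim_idx scale_shape (get_channel_count_and_dim_idx scale_shape)

-- ===== LEMMAS AND PROOFS =====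
-- the overwrite-fold from (1,0) equals the reverse first-match search
theorem pv_fold_eq_revfind (l : List (Int × Int)) :
    l.foldl (fun st p => if p.2 ≠ 1 then (p.2, p.1) else st) ((1 : Int), (0 : Int))
      = pvRevFind l.reverse := by
  induction l using List.reverseRecOn with
  | nil => simp [pvRevFind]
  | append_singleton xs x ih =>
    rcases x with ⟨i, d⟩
    by_cases hd : d = 1
    · simp [hd, pvRevFind]; simpa using ih
    · simp [hd, pvRevFind, ih]

-- ===== VERDICT (by name: the statement is the Claim_ definition above) =====
theorem get_channel_count_and_dim_idx_spec : Claim_equal_get_channel_count_and_dim_idx := by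
  intro s _
  unfold Spec_get_channel_count_and_dim_idx get_channel_count_and_dim_idx get_channel_count_and_dim_idx_alt
  exact pv_fold_eq_revfind _
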